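-- pv_equiv track=rewrite | github.com/jadye527/logicapp-docgen-final | logicapp_docgen/parser.py | extract_conditions_and_branches
-- ===== SOURCE A (Python) =====
-- def extract_conditions_and_branches(actions):
--     branches = {
--         "conditions": [],
--         "foreach": [],
--         "switch": []
--     }
--     for name, action in actions.items():
--         if action.get("type", "").lower() == "if":
--             branches["conditions"].append(name)
--         if action.get("type", "").lower() == "foreach":
--             branches["foreach"].append(name)
--         if action.get("type", "").lower() == "switch":
--             branches["switch"].append(name)
--     return branches
-- ===== SOURCE B (Python) =====
-- def extract_conditions_and_branches(actions):
--     def names_of(t):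
--         return [name for name, action in actions.items()
--                 if action.get("type", "").lower() == t]
--     return {
--         "conditions": names_of("if"),
--         "foreach": names_of("foreach"),
--         "switch": names_of("switch"),
--     }
-- ===== Notes on version B (the rewrite author's own statement) =====
-- stated objective: simpler
-- what changed: A makes one pass that mutates a pre-keyed dict under three per-item type checks; B does no accumulation at all: it assembles the result from three independent filter passes (one list comprehension per wanted type).
import Mathlib
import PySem

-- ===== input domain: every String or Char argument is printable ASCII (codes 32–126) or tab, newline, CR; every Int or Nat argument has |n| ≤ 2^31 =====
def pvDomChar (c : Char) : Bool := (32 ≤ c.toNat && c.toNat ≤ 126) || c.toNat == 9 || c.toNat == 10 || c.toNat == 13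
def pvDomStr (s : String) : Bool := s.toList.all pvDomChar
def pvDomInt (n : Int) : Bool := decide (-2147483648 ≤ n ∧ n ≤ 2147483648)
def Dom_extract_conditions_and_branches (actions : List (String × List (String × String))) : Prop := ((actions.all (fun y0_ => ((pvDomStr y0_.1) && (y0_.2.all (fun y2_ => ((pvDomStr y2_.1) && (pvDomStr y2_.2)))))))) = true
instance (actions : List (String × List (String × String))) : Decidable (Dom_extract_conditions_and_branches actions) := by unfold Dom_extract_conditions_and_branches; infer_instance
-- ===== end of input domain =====

-- B replaces A's single accumulating pass over a mutated pre-keyed dict by three independent filter passes, one per wanted type (simpler decomposition, same cost).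
-- ===== PORT A =====
-- port of A: a dict pre-keyed with the three branch lists, appended to under three type checks per item
def extract_conditions_and_branches (actions : List (String × List (String × String))) : List (String × List String) :=
  let branches : PySem.Dict String (List String) :=
    PySem.Dict.ofList [("conditions", []), ("foreach", []), ("switch", [])]
  let branches := actions.foldl (fun b p =>
    let name := p.1
    let action := PySem.Dict.mk p.2
    let b := if PySem.Str.lower (action.getD "type" "") == "if"
             then b.modify "conditions" [] (· ++ [name]) else b
    let b := if PySem.Str.lower (action.getD "type" "") == "foreach"
             then b.modify "foreach" [] (· ++ [name]) else b
    let b := if PySem.Str.lower (action.getD "type" "") == "switch"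
             then b.modify "switch" [] (· ++ [name]) else b
    b) branches
  branches.items

-- ===== PORT B =====
-- port of B's helper names_of(t): the list comprehension [name for name, action in actions if type.lower() == t]
def pvNamesOf (t : String) (actions : List (String × List (String × String))) : List String :=
  (actions.filter (fun p => PySem.Str.lower ((PySem.Dict.mk p.2).getD "type" "") == t)).map (·.1)

-- port of B: no accumulation, three independent filter passes assembled directly
def extract_conditions_and_branches_alt (actions : List (String × List (String × String))) : List (String × List String) :=
  [("conditions", pvNamesOf "if" actions),
   ("foreach", pvNamesOf "foreach" actions),
   ("switch", pvNamesOf "switch" actions)]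

-- ===== PRECONDITION & SPEC =====
def Spec_extract_conditions_and_branches (actions : List (String × List (String × String))) (out : List (String × List String)) : Prop := out = extract_conditions_and_branches_alt actions
instance (actions : List (String × List (String × String))) (out : List (String × List String)) : Decidable (Spec_extract_conditions_and_branches actions out) := by unfold Spec_extract_conditions_and_branches; infer_instance

-- ===== CLAIM =====
def Claim_equal_extract_conditions_and_branches : Prop := ∀ (actions : List (String × List (String × String))), Dom_extract_conditions_and_branches actions → Spec_extract_conditions_and_branches actions (extract_conditions_and_branches actions)

-- ===== LEMMAS AND PROOFS =====

-- the lowercased type of one (name, action) item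
def pvTyp (p : String × List (String × String)) : String :=
  PySem.Str.lower ((PySem.Dict.mk p.2).getD "type" "")

theorem pvNamesOf_cons (t : String) (p : String × List (String × String))
    (rest : List (String × List (String × String))) :
    pvNamesOf t (p :: rest) = if pvTyp p == t then p.1 :: pvNamesOf t rest else pvNamesOf t rest := by
  simp only [pvNamesOf, pvTyp, List.filter_cons]
  split <;> simp_all

-- one step of A's loop on the three-entry dict
theorem pvStepA (p : String × List (String × String)) (c f s : List String) :
    (fun (b : PySem.Dict String (List String)) (p : String × List (String × String)) =>
      let name := p.1
      let action := PySem.Dict.mk p.2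
      let b := if PySem.Str.lower (action.getD "type" "") == "if"
               then b.modify "conditions" [] (· ++ [name]) else b
      let b := if PySem.Str.lower (action.getD "type" "") == "foreach"
               then b.modify "foreach" [] (· ++ [name]) else b
      let b := if PySem.Str.lower (action.getD "type" "") == "switch"
               then b.modify "switch" [] (· ++ [name]) else b
      b) (PySem.Dict.mk [("conditions", c), ("foreach", f), ("switch", s)]) p
    = PySem.Dict.mk [("conditions", if pvTyp p == "if" then c ++ [p.1] else c),
                     ("foreach", if pvTyp p == "foreach" then f ++ [p.1] else f),
                     ("switch", if pvTyp p == "switch" then s ++ [p.1] else s)] := by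
  by_cases h1 : pvTyp p == "if" <;> by_cases h2 : pvTyp p == "foreach" <;>
    by_cases h3 : pvTyp p == "switch" <;>
    simp_all [pvTyp, PySem.Dict.modify, PySem.Dict.insert, PySem.Dict.getD,
      PySem.Dict.get?, PySem.Dict.contains]

-- A's fold, characterised by pvNamesOf
theorem pvFoldA (actions : List (String × List (String × String))) :
    ∀ (c f s : List String),
    actions.foldl (fun (b : PySem.Dict String (List String)) (p : String × List (String × String)) =>
      let name := p.1
      let action := PySem.Dict.mk p.2
      let b := if PySem.Str.lower (action.getD "type" "") == "if"
               then b.modify "conditions" [] (· ++ [name]) else b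
      let b := if PySem.Str.lower (action.getD "type" "") == "foreach"
               then b.modify "foreach" [] (· ++ [name]) else b
      let b := if PySem.Str.lower (action.getD "type" "") == "switch"
               then b.modify "switch" [] (· ++ [name]) else b
      b) (PySem.Dict.mk [("conditions", c), ("foreach", f), ("switch", s)])
    = PySem.Dict.mk [("conditions", c ++ pvNamesOf "if" actions),
                     ("foreach", f ++ pvNamesOf "foreach" actions),
                     ("switch", s ++ pvNamesOf "switch" actions)] := by
  induction actions with
  | nil => simp [pvNamesOf]
  | cons p rest ih =>
    intro c f s
    simp only [List.foldl_cons]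
    simp only [pvStepA]
    rw [ih]
    by_cases h1 : pvTyp p == "if" <;> by_cases h2 : pvTyp p == "foreach" <;>
      by_cases h3 : pvTyp p == "switch" <;>
      simp_all [pvNamesOf_cons]

-- ===== VERDICT =====
theorem extract_conditions_and_branches_spec : Claim_equal_extract_conditions_and_branches := by
  intro actions _
  unfold Spec_extract_conditions_and_branches
  unfold extract_conditions_and_branches extract_conditions_and_branches_alt
  have hof : PySem.Dict.ofList ([("conditions", ([] : List String)), ("foreach", []), ("switch", [])])
      = PySem.Dict.mk [("conditions", []), ("foreach", []), ("switch", [])] := by decide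
  simp only [hof, pvFoldA]
  simp
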